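-- pv_equiv track=rewrite | github.com/JonathanJdeKoning/CompetitiveProgramming | Problems/LeetCode/2549.py | distinctIntegers
-- ===== SOURCE A (Python) =====
-- def distinctIntegers(n: int) -> int:
--     old = set()
--     old.add(n)
--     while True:
--         oldlen = len(old)
--         for num in list(old):
--             for i in range(1,num+1):
--                 if num%i == 1:
--                     old.add(i)
--         if len(old) == oldlen:
--             return oldlen
-- ===== SOURCE B (Python) =====
-- def distinctIntegers(n: int) -> int:
--     # Closed form for the fixpoint A iterates to.
--     return n - 1 if n >= 2 else 1
-- ===== Notes on version B (the rewrite author's own statement) =====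
-- stated objective: faster
-- what changed: Replaces the iterate-to-fixpoint set closure (repeatedly scanning every element and every divisor candidate below it) with the closed form n-1 for n>=2 and 1 otherwise.
import Mathlib
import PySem

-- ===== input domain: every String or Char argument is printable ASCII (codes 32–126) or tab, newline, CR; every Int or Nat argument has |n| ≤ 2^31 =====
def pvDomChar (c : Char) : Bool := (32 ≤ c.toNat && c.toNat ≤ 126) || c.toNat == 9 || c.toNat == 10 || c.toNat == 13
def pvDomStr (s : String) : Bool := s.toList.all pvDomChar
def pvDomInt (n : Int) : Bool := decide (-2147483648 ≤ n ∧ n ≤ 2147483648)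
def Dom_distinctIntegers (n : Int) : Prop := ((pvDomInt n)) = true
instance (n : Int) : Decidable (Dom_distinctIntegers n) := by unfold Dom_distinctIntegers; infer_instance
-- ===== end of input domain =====

-- B replaces A's iterate-to-fixpoint set closure by its closed form; measured faster.

-- ===== PORT A =====
-- one pass of the while-body: 'for num in list(old): for i in range(1, num+1): if num % i == 1: old.add(i)'
-- (the snapshot list(old) is the set at the start of the pass; the foldl accumulator is the mutated set)
def pvPass (old : PySem.Set Int) : PySem.Set Int :=
  old.foldl (fun acc num =>
    (PySem.List.pyRange 1 (num + 1) 1).foldl (fun acc2 i =>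
      if PySem.Int.mod num i = 1 then PySem.Set.add acc2 i else acc2) acc) old

-- 'while True: …'; the fuel only makes the loop total (it is never exhausted, proved below)
def pvLoop (fuel : Nat) (old : PySem.Set Int) : Int :=
  match fuel with
  | 0 => 0
  | f + 1 =>
    let oldlen := PySem.Set.len old
    let old' := pvPass old
    if PySem.Set.len old' = oldlen then oldlen else pvLoop f old'

def distinctIntegers (n : Int) : Int :=
  pvLoop (n.toNat + 2) (PySem.Set.add PySem.Set.empty n)

-- ===== PORT B =====
def distinctIntegers_alt (n : Int) : Int := if 2 ≤ n then n - 1 else 1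

-- ===== PRECONDITION & SPEC =====
def Spec_distinctIntegers (n : Int) (out : Int) : Prop := out = distinctIntegers_alt n
instance (n : Int) (out : Int) : Decidable (Spec_distinctIntegers n out) := by unfold Spec_distinctIntegers; infer_instance

-- ===== CLAIM (what is proved, stated in full; the proofs are below) =====
def Claim_equal_distinctIntegers : Prop := ∀ (n : Int), Dom_distinctIntegers n → Spec_distinctIntegers n (distinctIntegers n)

-- ===== LEMMAS AND PROOFS =====

-- membership after the inner 'for i in range(1, num+1)' loop
theorem pv_mem_inner (num : Int) (L : List Int) (acc : PySem.Set Int) (x : Int) :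
    x ∈ L.foldl (fun a i => if PySem.Int.mod num i = 1 then PySem.Set.add a i else a) acc ↔
    x ∈ acc ∨ (x ∈ L ∧ PySem.Int.mod num x = 1) := by
  induction L generalizing acc with
  | nil => simp
  | cons h t ih =>
    simp only [List.foldl_cons]
    by_cases hc : PySem.Int.mod num h = 1
    · rw [if_pos hc, ih]
      simp only [PySem.Set.mem_add, List.mem_cons]
      constructor
      · rintro ((ha | rfl) | ⟨hx, hm⟩) <;> tauto
      · rintro (ha | ⟨(rfl | hx), hm⟩) <;> tauto
    · rw [if_neg hc, ih]
      simp only [List.mem_cons]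
      constructor
      · rintro (ha | ⟨hx, hm⟩) <;> tauto
      · rintro (ha | ⟨(rfl | hx), hm⟩) <;> tauto

theorem pv_nodup_inner (num : Int) (L : List Int) (acc : PySem.Set Int) (h : acc.Nodup) :
    (L.foldl (fun a i => if PySem.Int.mod num i = 1 then PySem.Set.add a i else a) acc).Nodup := by
  induction L generalizing acc with
  | nil => exact h
  | cons hd t ih =>
    simp only [List.foldl_cons]
    by_cases hc : PySem.Int.mod num hd = 1
    · rw [if_pos hc]; exact ih _ (PySem.Set.nodup_add _ _ h)
    · rw [if_neg hc]; exact ih _ h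

-- membership after one full pass over the snapshot list L
theorem pv_mem_outer (L : List Int) (acc : PySem.Set Int) (x : Int) :
    x ∈ L.foldl (fun acc num =>
      (PySem.List.pyRange 1 (num + 1) 1).foldl (fun acc2 i =>
        if PySem.Int.mod num i = 1 then PySem.Set.add acc2 i else acc2) acc) acc ↔
    x ∈ acc ∨ ∃ m ∈ L, 1 ≤ x ∧ x ≤ m ∧ PySem.Int.mod m x = 1 := by
  induction L generalizing acc with
  | nil => simp
  | cons hd t ih =>
    simp only [List.foldl_cons]
    rw [ih, pv_mem_inner, PySem.List.mem_pyRange_one]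
    constructor
    · rintro ((ha | ⟨⟨h1, h2⟩, hm⟩) | ⟨m, hmL, hx⟩)
      · exact Or.inl ha
      · exact Or.inr ⟨hd, by simp, h1, by omega, hm⟩
      · exact Or.inr ⟨m, by simp [hmL], hx⟩
    · rintro (ha | ⟨m, hmL, h1, h2, hm⟩)
      · exact Or.inl (Or.inl ha)
      · rcases List.mem_cons.mp hmL with rfl | hmt
        · exact Or.inl (Or.inr ⟨⟨h1, by omega⟩, hm⟩)
        · exact Or.inr ⟨m, hmt, h1, h2, hm⟩

theorem pv_nodup_outer (L : List Int) (acc : PySem.Set Int) (h : acc.Nodup) :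
    (L.foldl (fun acc num =>
      (PySem.List.pyRange 1 (num + 1) 1).foldl (fun acc2 i =>
        if PySem.Int.mod num i = 1 then PySem.Set.add acc2 i else acc2) acc) acc).Nodup := by
  induction L generalizing acc with
  | nil => exact h
  | cons hd t ih => exact ih _ (pv_nodup_inner _ _ _ h)

theorem pv_mem_pass (S : PySem.Set Int) (x : Int) :
    x ∈ pvPass S ↔ x ∈ S ∨ ∃ m ∈ S, 1 ≤ x ∧ x ≤ m ∧ PySem.Int.mod m x = 1 :=
  pv_mem_outer S S x

theorem pv_nodup_pass (S : PySem.Set Int) (h : S.Nodup) : (pvPass S).Nodup :=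
  pv_nodup_outer S S h

-- if num % i == 1 fires with 1 <= i <= num then in fact 2 <= i < num
theorem pv_cond (m x : Int) (h1 : 1 ≤ x) (h2 : x ≤ m) (h3 : PySem.Int.mod m x = 1) :
    2 ≤ x ∧ x < m := by
  have hx : 0 < x := by omega
  rw [PySem.Int.mod_eq_emod_of_pos hx] at h3
  constructor
  · rcases lt_or_ge x 2 with h | h
    · exfalso; have : x = 1 := by omega
      rw [this, Int.emod_one] at h3; omega
    · exact h
  · rcases lt_or_ge x m with h | h
    · exact h
    · exfalso; have : x = m := by omega
      rw [this, Int.emod_self] at h3; omega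

theorem pv_succ_mod (j : Int) (hj : 2 ≤ j) : PySem.Int.mod (j + 1) j = 1 := by
  rw [PySem.Int.mod_eq_emod_of_pos (show (0:Int) < j by omega)]
  have : j + 1 = 1 + j * 1 := by ring
  rw [this, Int.add_mul_emod_self_left, Int.emod_eq_of_lt (by omega) (by omega)]

-- invariant of the while loop (for n >= 3): the set is nodup, contains n, and sits inside [2, n]
def pvInv (n : Int) (S : PySem.Set Int) : Prop :=
  S.Nodup ∧ n ∈ S ∧ ∀ x ∈ S, 2 ≤ x ∧ x ≤ n

theorem pv_inv_pass (n : Int) (S : PySem.Set Int) (h : pvInv n S) : pvInv n (pvPass S) := by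
  obtain ⟨hnd, hn, hsub⟩ := h
  refine ⟨pv_nodup_pass S hnd, (pv_mem_pass S n).mpr (Or.inl hn), ?_⟩
  intro x hx
  rcases (pv_mem_pass S x).mp hx with hx | ⟨m, hm, h1, h2, h3⟩
  · exact hsub x hx
  · have := pv_cond m x h1 h2 h3
    have := hsub m hm
    omega

theorem pv_len_card (S : PySem.Set Int) (h : S.Nodup) :
    PySem.Set.len S = (S.toFinset.card : Int) := by
  rw [List.toFinset_card_of_nodup h]
  simp [PySem.Set.len]

theorem pv_card_le (n : Int) (S : PySem.Set Int) (h : pvInv n S) (hn : 3 ≤ n) :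
    (S.toFinset.card : Int) ≤ n - 1 := by
  obtain ⟨hnd, _, hsub⟩ := h
  have hsubF : S.toFinset ⊆ Finset.Icc 2 n := by
    intro x hx
    rw [List.mem_toFinset] at hx
    have := hsub x hx
    simp [Finset.mem_Icc]; omega
  have := Finset.card_le_card hsubF
  rw [Int.card_Icc] at this
  omega

-- if the set is not yet all of [2, n], the pass adds its largest missing element
theorem pv_progress (n : Int) (S : PySem.Set Int) (h : pvInv n S)
    (hmiss : ∃ x, 2 ≤ x ∧ x ≤ n ∧ x ∉ S) : ∃ j, j ∉ S ∧ j ∈ pvPass S := by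
  obtain ⟨hnd, hn, hsub⟩ := h
  classical
  set M : Finset Int := (Finset.Icc 2 n).filter (fun x => x ∉ S) with hM
  have hMne : M.Nonempty := by
    obtain ⟨x, h1, h2, h3⟩ := hmiss
    exact ⟨x, by simp [hM, Finset.mem_Icc]; exact ⟨⟨h1, h2⟩, h3⟩⟩
  set j := M.max' hMne with hj
  have hjM : j ∈ M := M.max'_mem hMne
  have hjI : 2 ≤ j ∧ j ≤ n ∧ j ∉ S := by
    have := hjM; simp [hM, Finset.mem_Icc] at this; tauto
  have hjn : j ≠ n := fun he => hjI.2.2 (he ▸ hn)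
  have hj1 : j + 1 ∈ S := by
    by_contra hns
    have : j + 1 ∈ M := by simp [hM, Finset.mem_Icc]; refine ⟨⟨by omega, by omega⟩, hns⟩
    have := M.le_max' _ this
    omega
  refine ⟨j, hjI.2.2, (pv_mem_pass S j).mpr (Or.inr ⟨j + 1, hj1, by omega, by omega, pv_succ_mod j hjI.1⟩)⟩

theorem pv_pass_subset (S : PySem.Set Int) : S.toFinset ⊆ (pvPass S).toFinset := by
  intro x hx
  rw [List.mem_toFinset] at hx ⊢
  exact (pv_mem_pass S x).mpr (Or.inl hx)

-- the main loop lemma for n >= 3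
theorem pv_loop_full (n : Int) (hn : 3 ≤ n) :
    ∀ (fuel : Nat) (S : PySem.Set Int), pvInv n S →
      n - 1 - (S.toFinset.card : Int) < (fuel : Int) → pvLoop fuel S = n - 1 := by
  intro fuel
  induction fuel with
  | zero =>
    intro S hInv hf
    exfalso
    have := pv_card_le n S hInv hn
    simp at hf
    omega
  | succ f ih =>
    intro S hInv hf
    by_cases hfull : ∀ x, 2 ≤ x → x ≤ n → x ∈ S
    · -- fixpoint reached: the set is exactly [2, n]
      have hmem : ∀ x, x ∈ pvPass S ↔ x ∈ S := by
        intro x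
        rw [pv_mem_pass]
        constructor
        · rintro (h | ⟨m, hm, h1, h2, h3⟩)
          · exact h
          · have hc := pv_cond m x h1 h2 h3
            have := hInv.2.2 m hm
            exact hfull x (by omega) (by omega)
        · exact Or.inl
      have hFeq : (pvPass S).toFinset = S.toFinset := by
        ext x; rw [List.mem_toFinset, List.mem_toFinset, hmem]
      have hSI : S.toFinset = Finset.Icc 2 n := by
        ext x
        rw [List.mem_toFinset, Finset.mem_Icc]
        exact ⟨fun h => hInv.2.2 x h, fun h => hfull x h.1 h.2⟩
      have hcard : (S.toFinset.card : Int) = n - 1 := by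
        rw [hSI, Int.card_Icc]; omega
      show (if PySem.Set.len (pvPass S) = PySem.Set.len S then PySem.Set.len S else pvLoop f (pvPass S)) = n - 1
      rw [pv_len_card S hInv.1, pv_len_card (pvPass S) (pv_nodup_pass S hInv.1), hFeq, if_pos rfl, hcard]
    · -- not a fixpoint: the pass strictly grows the set
      push Not at hfull
      obtain ⟨x, h1, h2, h3⟩ := hfull
      obtain ⟨j, hjS, hjP⟩ := pv_progress n S hInv ⟨x, h1, h2, h3⟩
      have hss : S.toFinset ⊂ (pvPass S).toFinset := by
        refine ⟨pv_pass_subset S, fun hsub => hjS ?_⟩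
        rw [← List.mem_toFinset]
        exact hsub (List.mem_toFinset.mpr hjP)
      have hlt := Finset.card_lt_card hss
      have hInv' := pv_inv_pass n S hInv
      show (if PySem.Set.len (pvPass S) = PySem.Set.len S then PySem.Set.len S else pvLoop f (pvPass S)) = n - 1
      rw [pv_len_card S hInv.1, pv_len_card (pvPass S) hInv'.1, if_neg (by omega)]
      apply ih _ hInv'
      push_cast at hf ⊢
      omega

theorem pv_start (n : Int) : PySem.Set.add PySem.Set.empty n = [n] :=
  PySem.Set.add_of_not_mem (by simp [PySem.Set.empty])

theorem pv_small (n : Int) (hn : n ≤ 0) : distinctIntegers n = 1 := by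
  have hfuel : n.toNat + 2 = 2 := by omega
  have hpass : pvPass [n] = [n] := by
    simp [pvPass, PySem.List.pyRange_one_eq_nil (show n + 1 ≤ 1 by omega)]
  unfold distinctIntegers
  rw [pv_start, hfuel]
  show (if PySem.Set.len (pvPass [n]) = PySem.Set.len [n] then PySem.Set.len [n] else pvLoop 1 (pvPass [n])) = 1
  rw [hpass, if_pos rfl]
  rfl

-- ===== VERDICT (by name: the statement is the Claim_ definition above) =====
theorem distinctIntegers_spec : Claim_equal_distinctIntegers := by
  unfold Claim_equal_distinctIntegers
  intro n _
  unfold Spec_distinctIntegers distinctIntegers_alt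
  by_cases h3 : 3 ≤ n
  · rw [if_pos (by omega)]
    unfold distinctIntegers
    rw [pv_start]
    apply pv_loop_full n h3 _ [n]
    · exact ⟨by simp, by simp, by intro x hx; simp at hx; omega⟩
    · simp
      omega
  · by_cases h0 : n ≤ 0
    · rw [if_neg (by omega)]
      exact pv_small n h0
    · have : n = 1 ∨ n = 2 := by omega
      rcases this with rfl | rfl
      · decide
      · decide
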